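-- pv_equiv track=rewrite | github.com/Rokongrelowiec/Python_some_tasks | frames/frames.py | frames
-- ===== SOURCE A (Python) =====
-- def frames(arr, n, k):
--     lst = []
--     for i in range(0, n):
--         tmp = arr[i:k+i]
--         min = tmp[0]
--         max = tmp[0]
--         for e in tmp:
--             if e > max:
--                 max = e
--             elif e < min:
--                 min = e
--         sub = max - min
--         lst.append(sub)
--     max_in_frame = 0
--     for i in lst:
--         if i > max_in_frame:
--             max_in_frame = i
--     return max_in_frame
-- ===== SOURCE B (Python) =====
-- def _push(stack, v):
--     # push v onto a min/max-caching stack of (value, max_so_far, min_so_far)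
--     if stack:
--         _, mx, mn = stack[-1]
--         stack.append((v, mx if mx > v else v, mn if mn < v else v))
--     else:
--         stack.append((v, v, v))
--
--
-- def frames(arr, n, k):
--     m = len(arr)
--     front = []   # out-stack of the amortized queue
--     back = []    # in-stack
--     best = 0
--     j = 0
--     for i in range(n):
--         end = i + k
--         if end > m:
--             end = m
--         while j < end:
--             _push(back, arr[j])
--             j += 1
--         if i > 0:
--             if not front:
--                 while back:
--                     _push(front, back.pop()[0])
--             front.pop()
--         if front and back:
--             d = max(front[-1][1], back[-1][1]) - min(front[-1][2], back[-1][2])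
--         elif front:
--             d = front[-1][1] - front[-1][2]
--         else:
--             d = back[-1][1] - back[-1][2]
--         if d > best:
--             best = d
--     return best
-- ===== Notes on version B (the rewrite author's own statement) =====
-- stated objective: faster
-- what changed: Replaced A's per-frame rescan (slice every window, linear min/max scan of each) by a single amortized sliding-window pass: a two-stack queue whose cells cache running max/min, so each element is pushed/popped O(1) times instead of being rescanned in up to k windows.
-- outside the precondition, e.g. on frames([1, 5, 3], 2, -2): A returns 0, B raises IndexError
import Mathlib
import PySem

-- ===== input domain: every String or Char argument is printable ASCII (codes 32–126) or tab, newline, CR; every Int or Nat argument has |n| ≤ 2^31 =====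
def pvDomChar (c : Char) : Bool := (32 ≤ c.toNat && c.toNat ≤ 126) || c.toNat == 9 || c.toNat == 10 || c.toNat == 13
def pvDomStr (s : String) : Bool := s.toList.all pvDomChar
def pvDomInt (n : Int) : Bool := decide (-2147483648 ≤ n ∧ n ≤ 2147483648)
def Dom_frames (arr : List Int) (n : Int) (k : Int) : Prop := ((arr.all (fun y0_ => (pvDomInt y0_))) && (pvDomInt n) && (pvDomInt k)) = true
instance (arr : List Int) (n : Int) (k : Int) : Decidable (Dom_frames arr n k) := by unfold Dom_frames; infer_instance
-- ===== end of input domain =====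

-- B replaces A's per-window rescan (slice + linear min/max per frame) by an amortized
-- two-stack sliding-window queue caching running max/min (a different algorithm, fewer
-- element comparisons per window).

-- ===== PORT A =====
-- inner 'for e in tmp' loop of A, state (min, max)
def framesScan (p : Int × Int) (e : Int) : Int × Int :=
  if e > p.2 then (p.1, e) else if e < p.1 then (e, p.2) else p

def frames (arr : List Int) (n : Int) (k : Int) : Int :=
  let lst := (PySem.List.pyRange 0 n 1).map (fun i =>
    let tmp := PySem.List.slice arr (some i) (some (k + i))
    match tmp with
    | [] => 0  -- Python: tmp[0] raises IndexError here; excluded by Pre_frames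
    | t :: _ =>
        let p := tmp.foldl framesScan (t, t)
        p.2 - p.1)
  lst.foldl (fun acc x => if x > acc then x else acc) 0

-- ===== PORT B =====
-- Source B's _push: stack of (value, running max, running min); Lean list head = Python list top (end)
def pushCell (s : List (Int × Int × Int)) (v : Int) : List (Int × Int × Int) :=
  match s with
  | [] => [(v, v, v)]
  | (_, mx, mn) :: _ => (v, if mx > v then mx else v, if mn < v then mn else v) :: s

-- Source B's 'while j < end: _push(back, arr[j]); j += 1'
def fillBack (arr : List Int) (s : List (Int × Int × Int)) (j e : Int) :
    List (Int × Int × Int) × Int :=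
  if j < e then fillBack arr (pushCell s (PySem.List.pyGetD arr j 0)) (j + 1) e else (s, j)
termination_by (e - j).toNat
decreasing_by omega

-- Source B's 'while back: _push(front, back.pop()[0])'
def transferStack (front back : List (Int × Int × Int)) : List (Int × Int × Int) :=
  match back with
  | [] => front
  | (v, _, _) :: rest => transferStack (pushCell front v) rest

-- Source B's 'if front and back: … elif front: … else: …' computation of d
def dCompute (front back : List (Int × Int × Int)) : Int :=
  match front, back with
  | (_, fmx, fmn) :: _, (_, bmx, bmn) :: _ =>
      (if fmx > bmx then fmx else bmx) - (if fmn < bmn then fmn else bmn)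
  | (_, fmx, fmn) :: _, [] => fmx - fmn
  | [], (_, bmx, bmn) :: _ => bmx - bmn
  | [], [] => 0  -- Python: back[-1] raises IndexError here; excluded by Pre_frames

-- one iteration of Source B's 'for i in range(n)' loop; state (front, back, j, best)
def framesStep (arr : List Int) (m k : Int)
    (st : List (Int × Int × Int) × List (Int × Int × Int) × Int × Int) (i : Int) :
    List (Int × Int × Int) × List (Int × Int × Int) × Int × Int :=
  let e := if i + k > m then m else i + k
  let fb := fillBack arr st.2.1 st.2.2.1 e
  let frbk : List (Int × Int × Int) × List (Int × Int × Int) :=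
    if i > 0 then
      if st.1.isEmpty then
        match transferStack st.1 fb.1 with
        | [] => ([], [])  -- Python: front.pop() raises IndexError here; excluded by Pre_frames
        | _ :: t => (t, [])
      else (st.1.tail, fb.1)
    else (st.1, fb.1)
  let d := dCompute frbk.1 frbk.2
  (frbk.1, frbk.2, fb.2, if d > st.2.2.2 then d else st.2.2.2)

def frames_alt (arr : List Int) (n : Int) (k : Int) : Int :=
  ((PySem.List.pyRange 0 n 1).foldl (framesStep arr arr.length k) ([], [], 0, 0)).2.2.2

-- ===== PRECONDITION & SPEC =====
-- Pre_ restricts to the natural domain of the task (frame width k ≥ 1 and at most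
-- len(arr) frames): outside it A raises IndexError on an empty slice, except on the
-- corner k ≤ -n, len(arr)+k ≥ 1 where A only returns via Python's negative-index
-- slice wraparound (there B raises); those inputs are excluded.
def Pre_frames (arr : List Int) (n : Int) (k : Int) : Prop :=
  n ≤ 0 ∨ (1 ≤ k ∧ n ≤ arr.length)
instance (arr : List Int) (n : Int) (k : Int) : Decidable (Pre_frames arr n k) := by
  unfold Pre_frames; infer_instance

def pvWitness_frames : List Int × Int × Int := ([1, 5, 3], 2, 2)

def Spec_frames (arr : List Int) (n : Int) (k : Int) (out : Int) : Prop := out = frames_alt arr n k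
instance (arr : List Int) (n : Int) (k : Int) (out : Int) : Decidable (Spec_frames arr n k out) := by unfold Spec_frames; infer_instance

-- ===== CLAIM (what is proved, stated in full; the proofs are below) =====
def Claim_equal_frames : Prop := ∀ (arr : List Int) (n : Int) (k : Int), Dom_frames arr n k → Pre_frames arr n k → Spec_frames arr n k (frames arr n k)

-- ===== LEMMAS AND PROOFS =====

def vals (s : List (Int × Int × Int)) : List Int := s.map (fun c => c.1)

-- stack well-formedness: each cell's cached max/min aggregate the cell and everything below
def wfS : List (Int × Int × Int) → Prop
  | [] => True
  | (v, mx, mn) :: s => wfS s ∧ mx = (vals s).foldl max v ∧ mn = (vals s).foldl min v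

-- range (max - min) of a list, 0 for []
def rng : List Int → Int
  | [] => 0
  | h :: t => (h :: t).foldl max h - (h :: t).foldl min h

def endN (m k' i : Nat) : Nat := min (i + k') m

def window (arr : List Int) (k' i : Nat) : List Int :=
  (arr.drop i).take (endN arr.length k' i - i)

def bestSpec (arr : List Int) (k' i : Nat) : Int :=
  ((List.range i).map (fun t => rng (window arr k' t))).foldl
    (fun acc x => if x > acc then x else acc) 0

-- queue state invariant after processing loop indices 0..i-1 (1 ≤ i)
def QInv (arr : List Int) (k' i : Nat)
    (st : List (Int × Int × Int) × List (Int × Int × Int) × Int × Int) : Prop :=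
  wfS st.1 ∧ wfS st.2.1 ∧
  vals st.1 ++ (vals st.2.1).reverse = window arr k' (i - 1) ∧
  st.2.2.1 = ((endN arr.length k' (i - 1) : Nat) : Int) ∧
  st.2.2.2 = bestSpec arr k' i

def stState (arr : List Int) (k : Int) (i : Nat) :
    List (Int × Int × Int) × List (Int × Int × Int) × Int × Int :=
  ((List.range i).map (Nat.cast : Nat → Int)).foldl (framesStep arr arr.length k) ([], [], 0, 0)

lemma foldl_max_max (l : List Int) : ∀ a b : Int, l.foldl max (max a b) = max a (l.foldl max b) := by
  induction l with
  | nil => intro a b; rfl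
  | cons x t ih =>
      intro a b
      simp only [List.foldl_cons]
      rw [max_assoc, ih]

lemma foldl_min_min (l : List Int) : ∀ a b : Int, l.foldl min (min a b) = min a (l.foldl min b) := by
  induction l with
  | nil => intro a b; rfl
  | cons x t ih =>
      intro a b
      simp only [List.foldl_cons]
      rw [min_assoc, ih]

lemma foldl_max_reverse (l : List Int) : ∀ a : Int, l.reverse.foldl max a = l.foldl max a := by
  induction l with
  | nil => intro a; rfl
  | cons x t ih =>
      intro a
      simp only [List.reverse_cons, List.foldl_append, List.foldl_cons, List.foldl_nil, ih]
      rw [max_comm a x, foldl_max_max]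
      exact (max_comm _ _)

lemma foldl_min_reverse (l : List Int) : ∀ a : Int, l.reverse.foldl min a = l.foldl min a := by
  induction l with
  | nil => intro a; rfl
  | cons x t ih =>
      intro a
      simp only [List.reverse_cons, List.foldl_append, List.foldl_cons, List.foldl_nil, ih]
      rw [min_comm a x, foldl_min_min]
      exact (min_comm _ _)

lemma foldl_max_absorb (l : List Int) : ∀ a b : Int, a ∈ l → l.foldl max (max b a) = l.foldl max b := by
  induction l with
  | nil => intro a b h; simp at h
  | cons x t ih =>
      intro a b h
      rcases List.mem_cons.mp h with h | h
      · subst h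
        simp only [List.foldl_cons]
        rw [max_assoc, max_self]
      · simp only [List.foldl_cons]
        rw [max_right_comm b a x, ih a (max b x) h]

lemma foldl_min_absorb (l : List Int) : ∀ a b : Int, a ∈ l → l.foldl min (min b a) = l.foldl min b := by
  induction l with
  | nil => intro a b h; simp at h
  | cons x t ih =>
      intro a b h
      rcases List.mem_cons.mp h with h | h
      · subst h
        simp only [List.foldl_cons]
        rw [min_assoc, min_self]
      · simp only [List.foldl_cons]
        rw [min_right_comm b a x, ih a (min b x) h]

lemma foldl_max_mem_swap (l : List Int) (a b : Int) (ha : a ∈ l) (hb : b ∈ l) :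
    l.foldl max a = l.foldl max b := by
  have h1 : l.foldl max (max a b) = l.foldl max a := foldl_max_absorb l b a hb
  have h2 : l.foldl max (max b a) = l.foldl max b := foldl_max_absorb l a b ha
  rw [← h1, ← h2, max_comm]

lemma foldl_min_mem_swap (l : List Int) (a b : Int) (ha : a ∈ l) (hb : b ∈ l) :
    l.foldl min a = l.foldl min b := by
  have h1 : l.foldl min (min a b) = l.foldl min a := foldl_min_absorb l b a hb
  have h2 : l.foldl min (min b a) = l.foldl min b := foldl_min_absorb l a b ha
  rw [← h1, ← h2, min_comm]

lemma rng_mem (l : List Int) (a : Int) (ha : a ∈ l) :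
    rng l = l.foldl max a - l.foldl min a := by
  cases l with
  | nil => simp at ha
  | cons h t =>
      rw [rng]
      rw [foldl_max_mem_swap (h :: t) h a (List.mem_cons_self) ha,
          foldl_min_mem_swap (h :: t) h a (List.mem_cons_self) ha]

lemma vals_push (s : List (Int × Int × Int)) (v : Int) : vals (pushCell s v) = v :: vals s := by
  cases s with
  | nil => rfl
  | cons c t => obtain ⟨w, mx, mn⟩ := c; rfl

lemma wf_push (s : List (Int × Int × Int)) (v : Int) (h : wfS s) : wfS (pushCell s v) := by
  cases s with
  | nil => simp [pushCell, wfS, vals]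
  | cons c t =>
      obtain ⟨w, mx, mn⟩ := c
      obtain ⟨ht, hmx, hmn⟩ := h
      refine ⟨⟨ht, hmx, hmn⟩, ?_, ?_⟩
      · show (if mx > v then mx else v) = (vals ((w, mx, mn) :: t)).foldl max v
        have hv : (vals ((w, mx, mn) :: t)).foldl max v = (vals t).foldl max (max v w) := rfl
        rw [hv, foldl_max_max, ← hmx]
        split_ifs <;> omega
      · show (if mn < v then mn else v) = (vals ((w, mx, mn) :: t)).foldl min v
        have hv : (vals ((w, mx, mn) :: t)).foldl min v = (vals t).foldl min (min v w) := rfl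
        rw [hv, foldl_min_min, ← hmn]
        split_ifs <;> omega

lemma transfer_spec (back : List (Int × Int × Int)) :
    ∀ front, wfS front →
      wfS (transferStack front back) ∧
      vals (transferStack front back) = (vals back).reverse ++ vals front := by
  induction back with
  | nil => intro front hf; exact ⟨hf, by simp [transferStack, vals]⟩
  | cons c rest ih =>
      intro front hf
      obtain ⟨v, mx, mn⟩ := c
      have h := ih (pushCell front v) (wf_push front v hf)
      refine ⟨h.1, ?_⟩
      have hstep : transferStack front ((v, mx, mn) :: rest) = transferStack (pushCell front v) rest := rfl
      rw [hstep, h.2, vals_push]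
      have hv : vals ((v, mx, mn) :: rest) = v :: vals rest := rfl
      rw [hv]
      simp

lemma fill_spec (arr : List Int) :
    ∀ (d j : Nat) (s : List (Int × Int × Int)), wfS s → j + d ≤ arr.length →
      (fillBack arr s (j : Int) ((j + d : Nat) : Int)).2 = ((j + d : Nat) : Int) ∧
      wfS (fillBack arr s (j : Int) ((j + d : Nat) : Int)).1 ∧
      vals (fillBack arr s (j : Int) ((j + d : Nat) : Int)).1 =
        ((arr.drop j).take d).reverse ++ vals s := by
  intro d
  induction d with
  | zero =>
      intro j s hs _
      rw [fillBack]
      simp [hs]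
  | succ d ih =>
      intro j s hs hlen
      have hj : j < arr.length := by omega
      have hlt : (j : Int) < ((j + (d+1) : Nat) : Int) := by push_cast; omega
      rw [fillBack]
      simp only [if_pos hlt]
      have hget : PySem.List.pyGetD arr (j : Int) 0 = arr[j] := by
        rw [PySem.List.pyGetD_natCast]
        exact List.getD_eq_getElem arr 0 hj
      have hcast : ((j : Int) + 1) = (((j + 1) : Nat) : Int) := by push_cast; ring
      have hcast2 : ((j + (d+1) : Nat) : Int) = (((j + 1) + d : Nat) : Int) := by push_cast; ring
      rw [hget, hcast, hcast2]
      have h := ih (j + 1) (pushCell s arr[j]) (wf_push s arr[j] hs) (by omega)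
      refine ⟨h.1, h.2.1, ?_⟩
      rw [h.2.2, vals_push]
      have hdrop : arr.drop j = arr[j] :: arr.drop (j + 1) := (List.getElem_cons_drop hj).symm
      rw [hdrop, List.take_succ_cons]
      simp

-- d computed from the stack tops is the range of the queue contents
lemma qdiff (front back : List (Int × Int × Int)) (hf : wfS front) (hb : wfS back)
    (hne : vals front ++ (vals back).reverse ≠ []) :
    dCompute front back = rng (vals front ++ (vals back).reverse) := by
  cases front with
  | nil =>
      cases back with
      | nil => simp [vals] at hne
      | cons c bt =>
          obtain ⟨bv, bmx, bmn⟩ := c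
          obtain ⟨hbt, hbmx, hbmn⟩ := hb
          have hv : vals ((bv, bmx, bmn) :: bt) = bv :: vals bt := rfl
          have hmem : bv ∈ ([] : List Int) ++ (vals ((bv, bmx, bmn) :: bt)).reverse := by
            rw [hv]; simp
          rw [show vals ([] : List (Int × Int × Int)) = [] from rfl] at *
          rw [rng_mem _ bv hmem]
          simp only [List.nil_append, hv]
          rw [foldl_max_reverse, foldl_min_reverse]
          simp only [List.foldl_cons, max_self, min_self]
          rw [dCompute, hbmx, hbmn]
  | cons c ft =>
      obtain ⟨fv, fmx, fmn⟩ := c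
      obtain ⟨hft, hfmx, hfmn⟩ := hf
      have hvf : vals ((fv, fmx, fmn) :: ft) = fv :: vals ft := rfl
      cases back with
      | nil =>
          rw [show vals ([] : List (Int × Int × Int)) = [] from rfl]
          simp only [List.reverse_nil, List.append_nil, hvf]
          rw [rng]
          simp only [List.foldl_cons, max_self, min_self]
          rw [dCompute, hfmx, hfmn]
      | cons b bt =>
          obtain ⟨bv, bmx, bmn⟩ := b
          obtain ⟨hbt, hbmx, hbmn⟩ := hb
          have hvb : vals ((bv, bmx, bmn) :: bt) = bv :: vals bt := rfl
          rw [hvf, hvb]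
          rw [List.cons_append, rng]
          simp only [List.foldl_cons, max_self, min_self]
          rw [List.foldl_append, List.foldl_append, foldl_max_reverse, foldl_min_reverse]
          simp only [List.foldl_cons]
          rw [← hfmx, ← hfmn, foldl_max_max, foldl_min_min]
          rw [← hbmx, ← hbmn]
          rw [dCompute]
          have h1 : (if fmx > bmx then fmx else bmx) = max fmx bmx := by
            split_ifs <;> omega
          have h2 : (if fmn < bmn then fmn else bmn) = min fmn bmn := by
            split_ifs <;> omega
          rw [h1, h2]

lemma window_ne (arr : List Int) (k' i : Nat) (hk : 1 ≤ k') (him : i < arr.length) :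
    window arr k' i ≠ [] := by
  intro h
  have hlen : (window arr k' i).length = min (endN arr.length k' i - i) (arr.length - i) := by
    simp [window]
  rw [h] at hlen
  simp only [List.length_nil] at hlen
  unfold endN at hlen
  omega

lemma window_extend (arr : List Int) (k' i : Nat) (hk : 1 ≤ k') (hi : 1 ≤ i)
    (him : i < arr.length) (hlt : i - 1 < arr.length) :
    window arr k' (i - 1) ++
      (arr.drop (endN arr.length k' (i - 1))).take (endN arr.length k' i - endN arr.length k' (i - 1)) =
    arr[i - 1] :: window arr k' i := by
  have h1 : i - 1 ≤ endN arr.length k' (i - 1) := by unfold endN; omega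
  have h01 : endN arr.length k' (i - 1) ≤ endN arr.length k' i := by unfold endN; omega
  have hie1 : i + 1 ≤ endN arr.length k' i := by unfold endN; omega
  have hdd : arr.drop (endN arr.length k' (i - 1)) =
      (arr.drop (i - 1)).drop (endN arr.length k' (i - 1) - (i - 1)) := by
    rw [List.drop_drop]
    congr 1
    omega
  rw [window, hdd, ← List.take_add]
  have h2 : endN arr.length k' (i - 1) - (i - 1) + (endN arr.length k' i - endN arr.length k' (i - 1)) =
      (endN arr.length k' i - i) + 1 := by omega
  rw [h2]
  have hdrop : arr.drop (i - 1) = arr[i - 1] :: arr.drop i := by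
    have := List.getElem_cons_drop hlt
    rw [show i - 1 + 1 = i by omega] at this
    exact this.symm
  rw [hdrop, List.take_succ_cons, window]

lemma bestSpec_succ (arr : List Int) (k' i : Nat) :
    bestSpec arr k' (i + 1) =
      if rng (window arr k' i) > bestSpec arr k' i then rng (window arr k' i)
      else bestSpec arr k' i := by
  simp [bestSpec, List.range_succ]

lemma step_inv (arr : List Int) (k : Int) (hk : 1 ≤ k) (i : Nat) (hi : 1 ≤ i)
    (him : i < arr.length)
    (st : List (Int × Int × Int) × List (Int × Int × Int) × Int × Int)
    (h : QInv arr k.toNat i st) :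
    QInv arr k.toNat (i + 1) (framesStep arr arr.length k st (i : Int)) := by
  obtain ⟨F, B, J, best⟩ := st
  obtain ⟨hwF, hwB, hcont, hJ, hbest⟩ := h
  dsimp only at hwF hwB hcont hJ hbest
  subst hJ hbest
  have hkk : 1 ≤ k.toNat := by omega
  have h01 : endN arr.length k.toNat (i - 1) ≤ endN arr.length k.toNat i := by unfold endN; omega
  have he1m : endN arr.length k.toNat i ≤ arr.length := by unfold endN; omega
  have hE : (if (i : Int) + k > (arr.length : Int) then (arr.length : Int) else (i : Int) + k) =
      ((endN arr.length k.toNat i : Nat) : Int) := by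
    unfold endN
    push_cast
    split_ifs <;> omega
  have hcast : ((endN arr.length k.toNat i : Nat) : Int) =
      ((endN arr.length k.toNat (i - 1) + (endN arr.length k.toNat i - endN arr.length k.toNat (i - 1)) : Nat) : Int) := by
    congr 1
    omega
  have hfill := fill_spec arr (endN arr.length k.toNat i - endN arr.length k.toNat (i - 1))
      (endN arr.length k.toNat (i - 1)) B hwB (by omega)
  have hpos : (0 : Int) < (i : Int) := by omega
  simp only [framesStep, hE, hcast]
  simp only [if_pos hpos]
  set FB := fillBack arr B ((endN arr.length k.toNat (i - 1) : Nat) : Int)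
      ((endN arr.length k.toNat (i - 1) + (endN arr.length k.toNat i - endN arr.length k.toNat (i - 1)) : Nat) : Int) with hFB
  have hcont2 : vals F ++ (vals FB.1).reverse = arr[i - 1]'(by omega) :: window arr k.toNat i := by
    rw [hfill.2.2, List.reverse_append, List.reverse_reverse, ← List.append_assoc, hcont]
    exact window_extend arr k.toNat i hkk hi him (by omega)
  have hwFB : wfS FB.1 := hfill.2.1
  have hJ2 : FB.2 = ((endN arr.length k.toNat i : Nat) : Int) := by rw [hfill.1, ← hcast]
  have hwne : window arr k.toNat i ≠ [] := window_ne arr k.toNat i hkk him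
  cases F with
  | nil =>
      simp only [List.isEmpty_nil, if_true]
      have htr := transfer_spec FB.1 [] trivial
      have hvt : vals (transferStack [] FB.1) = arr[i - 1]'(by omega) :: window arr k.toNat i := by
        rw [htr.2]
        simpa [vals] using hcont2
      cases htf : transferStack [] FB.1 with
      | nil => rw [htf] at hvt; simp [vals] at hvt
      | cons c t =>
          rw [htf] at hvt
          have hwct : wfS (c :: t) := htf ▸ htr.1
          dsimp only
          obtain ⟨cv, cmx, cmn⟩ := c
          have hwt : wfS t := hwct.1
          simp only [vals, List.map_cons] at hvt
          have hvt2 : vals t = window arr k.toNat i := by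
            have h' := (List.cons.injEq _ _ _ _).mp hvt
            simpa [vals] using h'.2
          have hct : vals t ++ (vals ([] : List (Int × Int × Int))).reverse = window arr k.toNat i := by
            simpa [vals] using hvt2
          refine ⟨hwt, trivial, ?_, ?_, ?_⟩
          · simpa using hct
          · simpa using hJ2
          · show (if dCompute t [] > bestSpec arr k.toNat i then dCompute t [] else bestSpec arr k.toNat i) =
              bestSpec arr k.toNat (i + 1)
            rw [qdiff t [] hwt trivial (by rw [hct]; exact hwne), hct, bestSpec_succ]
  | cons c ft =>
      simp only [List.isEmpty_cons, if_false, Bool.false_eq_true, List.tail_cons]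
      obtain ⟨cv, cmx, cmn⟩ := c
      have hwft : wfS ft := hwF.1
      simp only [vals, List.map_cons] at hcont2
      have hct : vals ft ++ (vals FB.1).reverse = window arr k.toNat i := by
        have h' := (List.cons.injEq _ _ _ _).mp hcont2
        simpa [vals] using h'.2
      refine ⟨hwft, hwFB, ?_, ?_, ?_⟩
      · simpa using hct
      · simpa using hJ2
      · show (if dCompute ft FB.1 > bestSpec arr k.toNat i then dCompute ft FB.1 else bestSpec arr k.toNat i) =
          bestSpec arr k.toNat (i + 1)
        rw [qdiff ft FB.1 hwft hwFB (by rw [hct]; exact hwne), hct, bestSpec_succ]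

lemma base_inv (arr : List Int) (k : Int) (hk : 1 ≤ k) (hm : 1 ≤ arr.length) :
    QInv arr k.toNat 1 (framesStep arr arr.length k ([], [], 0, 0) 0) := by
  have hkk : 1 ≤ k.toNat := by omega
  have he1m : endN arr.length k.toNat 0 ≤ arr.length := by unfold endN; omega
  have hE : (if (0 : Int) + k > (arr.length : Int) then (arr.length : Int) else (0 : Int) + k) =
      ((endN arr.length k.toNat 0 : Nat) : Int) := by
    unfold endN
    push_cast
    split_ifs <;> omega
  have hcast : ((endN arr.length k.toNat 0 : Nat) : Int) = (((0 : Nat) + endN arr.length k.toNat 0 : Nat) : Int) := by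
    simp
  have hfill := fill_spec arr (endN arr.length k.toNat 0) 0 ([] : List (Int × Int × Int)) trivial (by omega)
  simp only [Nat.cast_zero] at hfill
  have hneg : ¬ ((0 : Int) > 0) := by omega
  simp only [framesStep, hE, hcast]
  simp only [if_neg hneg]
  set FB := fillBack arr ([] : List (Int × Int × Int)) (0 : Int)
      (((0 : Nat) + endN arr.length k.toNat 0 : Nat) : Int) with hFB
  have hv : vals FB.1 = (window arr k.toNat 0).reverse := by
    rw [hfill.2.2]
    simp [window, vals]
  have hw : wfS FB.1 := hfill.2.1
  have hwne : window arr k.toNat 0 ≠ [] := window_ne arr k.toNat 0 hkk (by omega)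
  have hct : vals ([] : List (Int × Int × Int)) ++ (vals FB.1).reverse = window arr k.toNat 0 := by
    rw [hv]
    simp [vals]
  refine ⟨trivial, hw, ?_, ?_, ?_⟩
  · simpa using hct
  · show FB.2 = ((endN arr.length k.toNat 0 : Nat) : Int)
    rw [hfill.1]
    simp
  · show (if dCompute [] FB.1 > (0 : Int) then dCompute [] FB.1 else (0 : Int)) = bestSpec arr k.toNat 1
    rw [qdiff [] FB.1 trivial hw (by rw [hct]; exact hwne), hct, bestSpec_succ]
    have h0 : bestSpec arr k.toNat 0 = 0 := by simp [bestSpec]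
    rw [h0]

lemma inv_all (arr : List Int) (k : Int) (hk : 1 ≤ k) (i : Nat) (hi : 1 ≤ i)
    (him : i ≤ arr.length) : QInv arr k.toNat i (stState arr k i) := by
  induction i with
  | zero => omega
  | succ j ih =>
      have hst : stState arr k (j + 1) = framesStep arr arr.length k (stState arr k j) (j : Int) := by
        simp [stState, List.range_succ]
      by_cases hj : j = 0
      · subst hj
        have h0 : stState arr k 0 = ([], [], 0, 0) := by simp [stState]
        rw [hst, h0]
        exact base_inv arr k hk (by omega)
      · rw [hst]
        exact step_inv arr k hk j (by omega) (by omega) _ (ih (by omega) (by omega))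

lemma pyRange_cast (n : Int) :
    PySem.List.pyRange 0 n 1 = (List.range n.toNat).map (Nat.cast : Nat → Int) := by
  rw [PySem.List.pyRange_one]
  rw [sub_zero]
  apply List.map_congr_left
  intro a _
  rw [zero_add]

lemma alt_eq (arr : List Int) (n k : Int) (hk : 1 ≤ k) (hn : 1 ≤ n)
    (hnm : n ≤ (arr.length : Int)) :
    frames_alt arr n k = bestSpec arr k.toNat n.toNat := by
  have h2 := inv_all arr k hk n.toNat (by omega) (by omega)
  unfold frames_alt
  rw [pyRange_cast n]
  exact h2.2.2.2.2

lemma scan_spec (l : List Int) : ∀ a b : Int, a ≤ b →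
    l.foldl framesScan (a, b) = (l.foldl min a, l.foldl max b) := by
  induction l with
  | nil => intro a b _; rfl
  | cons x t ih =>
      intro a b hab
      simp only [List.foldl_cons, framesScan]
      split_ifs with h1 h2
      · rw [ih a x (by omega), show min a x = a from by omega, show max b x = x from by omega]
      · rw [ih x b (by omega), show min a x = x from by omega, show max b x = b from by omega]
      · rw [ih a b hab, show min a x = a from by omega, show max b x = b from by omega]

lemma a_eq (arr : List Int) (n k : Int) (hk : 1 ≤ k) (hn : 1 ≤ n)
    (hnm : n ≤ (arr.length : Int)) :
    frames arr n k = bestSpec arr k.toNat n.toNat := by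
  unfold frames
  dsimp only
  rw [pyRange_cast n, List.map_map]
  unfold bestSpec
  congr 1
  apply List.map_congr_left
  intro t ht
  have htn : t < n.toNat := List.mem_range.mp ht
  have htm : t < arr.length := by omega
  have hslice : PySem.List.slice arr (some ((t : Nat) : Int)) (some (k + (t : Nat))) =
      window arr k.toNat t := by
    rw [PySem.List.slice_toNat arr (by omega) (by omega)]
    have hA : ((t : Nat) : Int).toNat = t := by omega
    have hB : (k + ((t : Nat) : Int)).toNat - ((t : Nat) : Int).toNat = k.toNat := by omega
    rw [hB, hA]
    apply List.take_eq_take_iff.mpr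
    simp only [List.length_drop]
    unfold endN
    omega
  have hwne : window arr k.toNat t ≠ [] := window_ne arr k.toNat t (by omega) htm
  obtain ⟨h0, tl, hw⟩ := List.exists_cons_of_ne_nil hwne
  simp only [Function.comp_apply, hslice, hw]
  rw [scan_spec (h0 :: tl) h0 h0 le_rfl]
  rw [rng]

theorem frames_spec : Claim_equal_frames := by
  intro arr n k hdom hpre
  show frames arr n k = frames_alt arr n k
  by_cases hn : n ≤ 0
  · have h1 : PySem.List.pyRange 0 n 1 = [] := by
      rw [PySem.List.pyRange_one]
      have h2 : (n - 0).toNat = 0 := by omega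
      rw [h2]
      rfl
    unfold frames frames_alt
    rw [h1]
    simp
  · rcases hpre with h | ⟨hk, hnm⟩
    · exact absurd h hn
    · rw [a_eq arr n k hk (by omega) hnm, alt_eq arr n k hk (by omega) hnm]
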